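-- pv_equiv track=rewrite | github.com/salarrobot/basketball-system-analysis | pass_and_interception_detector/pass_and_interception_detector.py | detectPasses
-- ===== SOURCE A (Python) =====
-- from typing import Dict, List, Sequence
--
-- AssignmentFrame = Dict[int, int]
--
-- def detectPasses(
--
--     ballAcquisition: Sequence[int],
--     playerAssignment: Sequence[AssignmentFrame],
-- ) -> List[int]:
--     passes = [-1] * len(ballAcquisition)
--     prevHolder = -1
--     prevFrame = -1
--     for idx in range(1, len(ballAcquisition)):
--         if ballAcquisition[idx - 1] != -1:
--             prevHolder = ballAcquisition[idx - 1]
--             prevFrame = idx - 1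
--         currHolder = ballAcquisition[idx]
--         if prevHolder != -1 and currHolder != -1 and prevHolder != currHolder:
--             prevTeam = playerAssignment[prevFrame].get(prevHolder, -1)
--             currTeam = playerAssignment[idx].get(currHolder, -1)
--             if prevTeam == currTeam and prevTeam != -1:
--                 passes[idx] = prevTeam
--     return passes
-- ===== SOURCE B (Python) =====
-- from typing import Dict, List, Sequence
--
-- AssignmentFrame = Dict[int, int]
--
-- def detectPasses(
--     ballAcquisition: Sequence[int],
--     playerAssignment: Sequence[AssignmentFrame],
-- ) -> List[int]:
--     passes = [-1] * len(ballAcquisition)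
--     holderFrames = [i for i, v in enumerate(ballAcquisition) if v != -1]
--     for prevFrame, currFrame in zip(holderFrames, holderFrames[1:]):
--         prevHolder = ballAcquisition[prevFrame]
--         currHolder = ballAcquisition[currFrame]
--         if prevHolder != currHolder:
--             prevTeam = playerAssignment[prevFrame].get(prevHolder, -1)
--             currTeam = playerAssignment[currFrame].get(currHolder, -1)
--             if prevTeam == currTeam and prevTeam != -1:
--                 passes[currFrame] = prevTeam
--     return passes
-- ===== Notes on version B (the rewrite author's own statement) =====
-- stated objective: alternative
-- what changed: Replaces A's stateful prev-holder/prev-frame tracking loop over every frame with a two-phase decomposition: first collect the holder-frame indices, then iterate over consecutive holder-frame pairs and mark the completed passes.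
import Mathlib
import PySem

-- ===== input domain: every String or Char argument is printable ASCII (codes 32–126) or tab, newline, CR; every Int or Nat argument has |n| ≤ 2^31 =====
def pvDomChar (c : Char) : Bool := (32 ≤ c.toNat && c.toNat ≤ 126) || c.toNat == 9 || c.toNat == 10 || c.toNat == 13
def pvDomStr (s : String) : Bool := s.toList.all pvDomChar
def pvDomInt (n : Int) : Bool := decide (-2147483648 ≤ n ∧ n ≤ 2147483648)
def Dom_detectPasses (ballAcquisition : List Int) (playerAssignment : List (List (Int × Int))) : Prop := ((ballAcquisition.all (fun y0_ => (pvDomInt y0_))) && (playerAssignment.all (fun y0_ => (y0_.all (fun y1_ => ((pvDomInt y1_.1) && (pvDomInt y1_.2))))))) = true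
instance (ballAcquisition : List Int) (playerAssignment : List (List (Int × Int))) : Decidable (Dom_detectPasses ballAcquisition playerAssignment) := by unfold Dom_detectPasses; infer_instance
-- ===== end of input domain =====

-- B replaces A's stateful prev-holder tracking loop with a holder-frames list plus a pass over its
-- consecutive pairs (alternative decomposition, same asymptotic cost); return values agree on Pre_.

-- ===== PORT A =====
-- loop body of A's 'for idx in range(1, len(ballAcquisition))'; state = (passes, prevHolder, prevFrame)
def pvAStep (bA : List Int) (pA : List (List (Int × Int))) (st : List Int × Int × Int) (idx : Int) : List Int × Int × Int :=
  let passes := st.1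
  let prevHolder0 := st.2.1
  let prevFrame0 := st.2.2
  let prev := PySem.List.pyGetD bA (idx - 1) (-1)      -- ballAcquisition[idx-1]; idx-1 always in range
  let prevHolder := if prev ≠ -1 then prev else prevHolder0
  let prevFrame := if prev ≠ -1 then idx - 1 else prevFrame0
  let currHolder := PySem.List.pyGetD bA idx (-1)      -- ballAcquisition[idx]; in range
  if prevHolder ≠ -1 ∧ currHolder ≠ -1 ∧ prevHolder ≠ currHolder then
    -- playerAssignment[...] raises IndexError out of range: those inputs are excluded by Pre_
    let prevTeam := (PySem.Dict.mk (PySem.List.pyGetD pA prevFrame [])).getD prevHolder (-1)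
    let currTeam := (PySem.Dict.mk (PySem.List.pyGetD pA idx [])).getD currHolder (-1)
    if prevTeam = currTeam ∧ prevTeam ≠ -1 then (PySem.List.pySetD passes idx prevTeam, prevHolder, prevFrame)
    else (passes, prevHolder, prevFrame)
  else (passes, prevHolder, prevFrame)

def detectPasses (ballAcquisition : List Int) (playerAssignment : List (List (Int × Int))) : List Int :=
  ((PySem.List.pyRange 1 (ballAcquisition.length : Int) 1).foldl
    (pvAStep ballAcquisition playerAssignment)
    (List.replicate ballAcquisition.length (-1), -1, -1)).1

-- ===== PORT B =====
-- loop body of B's 'for prevFrame, currFrame in zip(holderFrames, holderFrames[1:])'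
def pvBStep (bA : List Int) (pA : List (List (Int × Int))) (passes : List Int) (pr : Int × Int) : List Int :=
  let prevFrame := pr.1
  let currFrame := pr.2
  let prevHolder := PySem.List.pyGetD bA prevFrame (-1)
  let currHolder := PySem.List.pyGetD bA currFrame (-1)
  if prevHolder ≠ currHolder then
    let prevTeam := (PySem.Dict.mk (PySem.List.pyGetD pA prevFrame [])).getD prevHolder (-1)
    let currTeam := (PySem.Dict.mk (PySem.List.pyGetD pA currFrame [])).getD currHolder (-1)
    if prevTeam = currTeam ∧ prevTeam ≠ -1 then PySem.List.pySetD passes currFrame prevTeam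
    else passes
  else passes

def detectPasses_alt (ballAcquisition : List Int) (playerAssignment : List (List (Int × Int))) : List Int :=
  let holderFrames := (PySem.List.enumerate ballAcquisition 0).filterMap
    (fun p => if p.2 ≠ -1 then some p.1 else none)
  (holderFrames.zip (PySem.List.slice holderFrames (some 1) none)).foldl
    (pvBStep ballAcquisition playerAssignment)
    (List.replicate ballAcquisition.length (-1))

-- ===== PRECONDITION & SPEC =====
-- Pre_ excludes exactly the inputs on which A raises IndexError: those where some holder change is
-- completed at a frame index ≥ len(playerAssignment) (the per-frame team lookup then goes out of range).
def Pre_detectPasses (ballAcquisition : List Int) (playerAssignment : List (List (Int × Int))) : Prop :=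
  ∀ j, j < ballAcquisition.length →
    (playerAssignment.length ≤ j ∧ ballAcquisition.getD j (-1) ≠ -1) →
    ∀ i, i < j →
      (ballAcquisition.getD i (-1) ≠ -1 ∧
        (∀ t, t < j → i < t → ballAcquisition.getD t (-1) = -1)) →
      ballAcquisition.getD i (-1) = ballAcquisition.getD j (-1)
instance (ballAcquisition : List Int) (playerAssignment : List (List (Int × Int))) : Decidable (Pre_detectPasses ballAcquisition playerAssignment) := by unfold Pre_detectPasses; infer_instance

def pvWitness_detectPasses : List Int × (List (List (Int × Int))) := ([1, 2], [[(1, 0)], [(2, 0)]])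

def Spec_detectPasses (ballAcquisition : List Int) (playerAssignment : List (List (Int × Int))) (out : List Int) : Prop := out = detectPasses_alt ballAcquisition playerAssignment
instance (ballAcquisition : List Int) (playerAssignment : List (List (Int × Int))) (out : List Int) : Decidable (Spec_detectPasses ballAcquisition playerAssignment out) := by unfold Spec_detectPasses; infer_instance

-- ===== CLAIM (what is proved, stated in full; the proofs are below) =====
def Claim_equal_detectPasses : Prop := ∀ (ballAcquisition : List Int) (playerAssignment : List (List (Int × Int))), Dom_detectPasses ballAcquisition playerAssignment → Pre_detectPasses ballAcquisition playerAssignment → Spec_detectPasses ballAcquisition playerAssignment (detectPasses ballAcquisition playerAssignment)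

-- ===== LEMMAS AND PROOFS =====

-- holder frames among indices < k (B's holderFrames, restricted to a prefix)
def pvHF (bA : List Int) : Nat → List Int
  | 0 => []
  | k + 1 => pvHF bA k ++ (if bA.getD k (-1) ≠ -1 then [((k : Nat) : Int)] else [])

-- A's (prevHolder, prevFrame) after having incorporated indices < k
def pvLS (bA : List Int) : Nat → Int × Int
  | 0 => (-1, -1)
  | k + 1 => if bA.getD k (-1) ≠ -1 then (bA.getD k (-1), ((k : Nat) : Int)) else pvLS bA k

lemma pv_hf_pos (bA : List Int) (k : Nat) (h : bA.getD k (-1) ≠ -1) :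
    pvHF bA (k + 1) = pvHF bA k ++ [((k : Nat) : Int)] := by
  rw [pvHF, if_pos h]

lemma pv_hf_neg (bA : List Int) (k : Nat) (h : ¬ bA.getD k (-1) ≠ -1) :
    pvHF bA (k + 1) = pvHF bA k := by
  rw [pvHF, if_neg h, List.append_nil]

lemma pv_ls_pos (bA : List Int) (k : Nat) (h : bA.getD k (-1) ≠ -1) :
    pvLS bA (k + 1) = (bA.getD k (-1), ((k : Nat) : Int)) := by
  rw [pvLS, if_pos h]

lemma pv_ls_neg (bA : List Int) (k : Nat) (h : ¬ bA.getD k (-1) ≠ -1) :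
    pvLS bA (k + 1) = pvLS bA k := by
  rw [pvLS, if_neg h]

lemma pv_pairs_snoc (L : List Int) (a : Int) :
    (L ++ [a]).zip ((L ++ [a]).drop 1)
      = L.zip (L.drop 1) ++ (match L.getLast? with | none => [] | some b => [(b, a)]) := by
  induction L with
  | nil => simp
  | cons x L ih =>
    cases L with
    | nil => simp
    | cons y T =>
      simpa [List.zip] using ih

lemma pv_ls_hf (bA : List Int) (k : Nat) :
    ((pvHF bA k).getLast? = none ∧ pvLS bA k = (-1, -1)) ∨
      (∃ j : Nat, j < k ∧ (pvHF bA k).getLast? = some ((j : Nat) : Int) ∧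
        bA.getD j (-1) ≠ -1 ∧ pvLS bA k = (bA.getD j (-1), ((j : Nat) : Int))) := by
  induction k with
  | zero => left; exact ⟨rfl, rfl⟩
  | succ k ih =>
    by_cases h : bA.getD k (-1) ≠ -1
    · right
      refine ⟨k, Nat.lt_succ_self k, ?_, h, pv_ls_pos bA k h⟩
      rw [pv_hf_pos bA k h, List.getLast?_append_cons, List.getLast?_singleton]
    · rw [pv_hf_neg bA k h, pv_ls_neg bA k h]
      rcases ih with ⟨h1, h2⟩ | ⟨j, hj, h1, h2, h3⟩
      · left; exact ⟨h1, h2⟩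
      · right; exact ⟨j, Nat.lt_succ_of_lt hj, h1, h2, h3⟩

lemma pv_hf_prefix (bA : List Int) (x : Int) (k : Nat) (hk : k ≤ bA.length) :
    pvHF (bA ++ [x]) k = pvHF bA k := by
  induction k with
  | zero => rfl
  | succ k ih =>
    have hlt : k < bA.length := hk
    have hg : (bA ++ [x]).getD k (-1) = bA.getD k (-1) := by
      simp [List.getD, List.getElem?_append_left hlt]
    rw [pvHF, pvHF, hg, ih (Nat.le_of_lt hlt)]

lemma pv_hf_eq (bA : List Int) :
    (PySem.List.enumerate bA 0).filterMap (fun p => if p.2 ≠ -1 then some p.1 else none)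
      = pvHF bA bA.length := by
  induction bA using List.reverseRecOn with
  | nil => rfl
  | append_singleton xs x ih =>
    have he : PySem.List.enumerate (xs ++ [x]) 0
        = PySem.List.enumerate xs 0 ++ [((xs.length : Int), x)] := by
      rw [PySem.List.enumerate_append]
      simp [PySem.List.enumerate_cons, PySem.List.enumerate_nil]
    have hg : (xs ++ [x]).getD xs.length (-1) = x := by
      simp [List.getD]
    rw [he, List.filterMap_append, ih, List.length_append]
    simp only [List.length_cons, List.length_nil]
    show _ = pvHF (xs ++ [x]) (xs.length + 1)
    rw [pvHF, pv_hf_prefix xs x xs.length (le_refl _), hg]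
    by_cases hx : x = -1 <;> simp [hx, List.filterMap]

lemma pv_main (bA : List Int) (pA : List (List (Int × Int))) (m : Nat) (hm : m + 1 ≤ bA.length) :
    (PySem.List.pyRange 1 ((m : Int) + 1) 1).foldl (pvAStep bA pA)
        (List.replicate bA.length (-1), -1, -1)
      = (((pvHF bA (m + 1)).zip ((pvHF bA (m + 1)).drop 1)).foldl (pvBStep bA pA)
          (List.replicate bA.length (-1)), pvLS bA m) := by
  induction m with
  | zero =>
    rw [PySem.List.pyRange_one_eq_nil (by norm_num)]
    show (List.replicate bA.length (-1), (-1 : Int), (-1 : Int)) = _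
    have hzip : ((pvHF bA 1).zip ((pvHF bA 1).drop 1)) = [] := by
      by_cases h : bA.getD 0 (-1) ≠ -1
      · rw [show (1 : Nat) = 0 + 1 from rfl, pv_hf_pos bA 0 h]; rfl
      · rw [show (1 : Nat) = 0 + 1 from rfl, pv_hf_neg bA 0 h]; rfl
    rw [hzip]
    rfl
  | succ m ih =>
    have hm' : m + 1 ≤ bA.length := Nat.le_of_succ_le hm
    have hrange : PySem.List.pyRange 1 ((↑(m + 1) : Int) + 1) 1
        = PySem.List.pyRange 1 ((m : Int) + 1) 1 ++ [((m : Int) + 1)] := by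
      push_cast
      exact PySem.List.pyRange_one_succ_right (by omega)
    rw [hrange, List.foldl_append, ih hm', List.foldl_cons, List.foldl_nil]
    -- the two index rewrites for A's step at idx = ↑m + 1
    have hprev : PySem.List.pyGetD bA ((m : Int) + 1 - 1) (-1) = bA.getD m (-1) := by
      rw [show ((m : Int) + 1 - 1) = ((m : Nat) : Int) by ring, PySem.List.pyGetD_natCast]
    have hcurr : PySem.List.pyGetD bA ((m : Int) + 1) (-1) = bA.getD (m + 1) (-1) := by
      rw [show ((m : Int) + 1) = ((m + 1 : Nat) : Int) by push_cast; ring, PySem.List.pyGetD_natCast]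
    -- A's updated (prevHolder, prevFrame) is pvLS bA (m + 1)
    have hls1 : ((if bA.getD m (-1) ≠ -1 then bA.getD m (-1) else (pvLS bA m).1),
        (if bA.getD m (-1) ≠ -1 then (m : Int) + 1 - 1 else (pvLS bA m).2)) = pvLS bA (m + 1) := by
      by_cases hb : bA.getD m (-1) ≠ -1
      · rw [if_pos hb, if_pos hb, pv_ls_pos bA m hb,
          show ((m : Int) + 1 - 1) = ((m : Nat) : Int) by ring]
      · rw [if_neg hb, if_neg hb, pv_ls_neg bA m hb]
    have hfst := congrArg Prod.fst hls1
    have hsnd := congrArg Prod.snd hls1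
    dsimp only at hfst hsnd
    simp only [pvAStep, hprev, hcurr]
    rw [hfst, hsnd, show ((m : Int) + 1) = ((m + 1 : Nat) : Int) by push_cast; ring]
    by_cases hc : bA.getD (m + 1) (-1) ≠ -1
    · -- index m+1 is a holder frame: one pair is appended when an earlier holder exists
      rw [pv_hf_pos bA (m + 1) hc, pv_pairs_snoc, List.foldl_append]
      rcases pv_ls_hf bA (m + 1) with ⟨h1, h2⟩ | ⟨j, hj, h1, h2, h3⟩
      · -- no earlier holder: prevHolder = -1, neither side updates passes
        rw [h1, h2]
        rw [if_neg (by intro hab; exact hab.1 rfl)]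
        rfl
      · -- earlier holder j: both sides examine the pair (j, m + 1)
        rw [h1, h3, List.foldl_cons, List.foldl_nil]
        dsimp only
        simp only [pvBStep, PySem.List.pyGetD_natCast]
        by_cases hne : bA.getD j (-1) ≠ bA.getD (m + 1) (-1)
        · rw [if_pos (⟨h2, hc, hne⟩ : _ ∧ _ ∧ _), if_pos hne]
          split <;> rfl
        · rw [if_neg (fun hab => hne hab.2.2), if_neg hne]
    · -- index m+1 holds no one: no pair appended, A's branch is dead
      rw [pv_hf_neg bA (m + 1) hc]
      rw [if_neg (fun hab => hc hab.2.1)]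

lemma pv_eq (bA : List Int) (pA : List (List (Int × Int))) :
    detectPasses bA pA = detectPasses_alt bA pA := by
  unfold detectPasses detectPasses_alt
  rw [pv_hf_eq]
  show _ = List.foldl (pvBStep bA pA) (List.replicate bA.length (-1))
    ((pvHF bA bA.length).zip (PySem.List.slice (pvHF bA bA.length) (some 1) none))
  have hslice : PySem.List.slice (pvHF bA bA.length) (some 1) none
      = (pvHF bA bA.length).drop 1 := by
    rw [show (1 : Int) = ((1 : Nat) : Int) from rfl, PySem.List.slice_from_natCast]
  rw [hslice]
  cases hn : bA.length with
  | zero => rfl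
  | succ m =>
    have h := pv_main bA pA m (by omega)
    rw [hn] at h
    rw [show ((m + 1 : Nat) : Int) = ((m : Int) + 1) by push_cast; ring, h]

-- ===== VERDICT (by name: the statement is the Claim_ definition above) =====
theorem detectPasses_spec : Claim_equal_detectPasses := by
  intro bA pA _ _
  show detectPasses bA pA = detectPasses_alt bA pA
  exact pv_eq bA pA
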